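-- pv_equiv track=rewrite | github.com/daleysoftware/codeeval | 2-hard/palindromic-ranges/main.py | count_palindromic_ranges
-- ===== SOURCE A (Python) =====
-- def count_palindromic_ranges(palindrome_array):
--     result = 0
--     for width in range(1, len(palindrome_array)+1):
--         for start in range(len(palindrome_array)):
--             if start + width > len(palindrome_array):
--                 break
--             palindrome_count = 0
--             for i in range(start, start+width):
--                 if palindrome_array[i]:
--                     palindrome_count += 1
--             if palindrome_count % 2 == 0:
--                 result += 1
--     return result
-- ===== SOURCE B (Python) =====
-- def count_palindromic_ranges(palindrome_array):
--     # One pass: a range [s, s+w) has an even number of truthy entries iff the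
--     # prefix parities at s and s+w are equal, so count pairs of equal-parity prefixes.
--     even, odd, parity, result = 1, 0, 0, 0
--     for x in palindrome_array:
--         if x:
--             parity = 1 - parity
--         if parity == 0:
--             result += even
--             even += 1
--         else:
--             result += odd
--             odd += 1
--     return result
-- ===== Notes on version B (the rewrite author's own statement) =====
-- stated objective: faster
-- what changed: Replaced the triple loop over (width, start, index) by a single pass that counts pairs of prefix-parity matches (a range has an even number of truthy entries iff the prefix parities at its two ends are equal).
import Mathlib
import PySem

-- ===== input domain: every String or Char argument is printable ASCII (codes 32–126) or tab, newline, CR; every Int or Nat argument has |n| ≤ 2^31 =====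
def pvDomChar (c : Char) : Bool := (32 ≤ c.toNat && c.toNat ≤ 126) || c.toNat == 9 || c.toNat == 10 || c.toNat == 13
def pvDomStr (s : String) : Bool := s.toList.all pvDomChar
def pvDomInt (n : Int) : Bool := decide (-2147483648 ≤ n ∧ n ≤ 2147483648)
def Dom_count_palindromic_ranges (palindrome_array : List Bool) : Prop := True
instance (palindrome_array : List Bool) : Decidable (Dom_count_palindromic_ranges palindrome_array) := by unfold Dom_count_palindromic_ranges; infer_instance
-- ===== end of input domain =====

-- B replaces A's triple loop by a single pass counting equal-parity prefix pairs (measured asymptotically faster).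

-- ===== PORT A =====
-- the 'for start' loop with its break, as structural recursion over the list of start values;
-- the index i of palindrome_array[i] is always in range here, ported as pyGetD (exact on these inputs)
def pvInnerA (xs : List Bool) (n w : Int) : List Int → Int → Int
  | [], result => result
  | s :: rest, result =>
    if s + w > n then result
    else
      let pc := (PySem.List.pyRange s (s + w) 1).foldl
        (fun c i => if PySem.List.pyGetD xs i false then c + 1 else c) 0
      pvInnerA xs n w rest (if PySem.Int.mod pc 2 = 0 then result + 1 else result)

def count_palindromic_ranges (palindrome_array : List Bool) : Int :=
  (PySem.List.pyRange 1 ((palindrome_array.length : Int) + 1) 1).foldl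
    (fun result width =>
      pvInnerA palindrome_array (palindrome_array.length : Int) width
        (PySem.List.pyRange 0 (palindrome_array.length : Int) 1) result) 0

-- ===== PORT B =====
def count_palindromic_ranges_alt (palindrome_array : List Bool) : Int :=
  (palindrome_array.foldl
    (fun (st : Int × Int × Int × Int) x =>
      let parity := if x then 1 - st.2.2.1 else st.2.2.1
      if parity = 0 then (st.1 + 1, st.2.1, parity, st.2.2.2 + st.1)
      else (st.1, st.2.1 + 1, parity, st.2.2.2 + st.2.1))
    (1, 0, 0, 0)).2.2.2

-- ===== PRECONDITION & SPEC =====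
def Spec_count_palindromic_ranges (palindrome_array : List Bool) (out : Int) : Prop := out = count_palindromic_ranges_alt palindrome_array
instance (palindrome_array : List Bool) (out : Int) : Decidable (Spec_count_palindromic_ranges palindrome_array out) := by unfold Spec_count_palindromic_ranges; infer_instance

-- ===== CLAIM (what is proved, stated in full; the proofs are below) =====
def Claim_equal_count_palindromic_ranges : Prop := ∀ (palindrome_array : List Bool), Dom_count_palindromic_ranges palindrome_array → Spec_count_palindromic_ranges palindrome_array (count_palindromic_ranges palindrome_array)

-- ===== LEMMAS AND PROOFS =====

-- parity of the number of Trues among the first k entries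
def pvPP (xs : List Bool) (k : Nat) : Nat := ((xs.take k).count true) % 2

-- indicator: prefix parities at i and j agree (= the range [i, j) has an even count)
def pvF (xs : List Bool) (i j : Nat) : Int := if pvPP xs i = pvPP xs j then 1 else 0

-- number of equal-parity prefix pairs: the common value of both programs
def pvT (xs : List Bool) : Int :=
  ∑ j ∈ Finset.range (xs.length + 1), ∑ i ∈ Finset.range j, pvF xs i j

def pvE (xs : List Bool) : Int :=
  ∑ k ∈ Finset.range (xs.length + 1), if pvPP xs k = 0 then 1 else 0

def pvO (xs : List Bool) : Int :=
  ∑ k ∈ Finset.range (xs.length + 1), if pvPP xs k = 0 then 0 else 1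

-- A's even-count indicator for start s and width w
def pvInd (xs : List Bool) (w s : Int) : Int :=
  if PySem.Int.mod ((PySem.List.pyRange s (s + w) 1).foldl
      (fun c i => if PySem.List.pyGetD xs i false then c + 1 else c) 0) 2 = 0
  then 1 else 0

lemma pvPP_append (xs : List Bool) (b : Bool) (k : Nat) (h : k ≤ xs.length) :
    pvPP (xs ++ [b]) k = pvPP xs k := by
  unfold pvPP
  rw [List.take_append_of_le_length h]

lemma pvPP_append_last (xs : List Bool) (b : Bool) :
    pvPP (xs ++ [b]) (xs.length + 1) = (xs.count true + (if b then 1 else 0)) % 2 := by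
  unfold pvPP
  rw [List.take_of_length_le (by simp), List.count_append]
  cases b <;> simp

lemma pvPP_lt_two (xs : List Bool) (k : Nat) : pvPP xs k < 2 := by
  unfold pvPP; omega

lemma pvE_append (xs : List Bool) (b : Bool) :
    pvE (xs ++ [b]) = pvE xs + (if pvPP (xs ++ [b]) (xs.length + 1) = 0 then 1 else 0) := by
  unfold pvE
  rw [show (xs ++ [b]).length + 1 = (xs.length + 1) + 1 by simp, Finset.sum_range_succ]
  congr 1
  exact Finset.sum_congr rfl fun k hk => by
    rw [pvPP_append xs b k (by simpa using Nat.lt_succ_iff.mp (Finset.mem_range.mp hk))]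

lemma pvO_append (xs : List Bool) (b : Bool) :
    pvO (xs ++ [b]) = pvO xs + (if pvPP (xs ++ [b]) (xs.length + 1) = 0 then 0 else 1) := by
  unfold pvO
  rw [show (xs ++ [b]).length + 1 = (xs.length + 1) + 1 by simp, Finset.sum_range_succ]
  congr 1
  exact Finset.sum_congr rfl fun k hk => by
    rw [pvPP_append xs b k (by simpa using Nat.lt_succ_iff.mp (Finset.mem_range.mp hk))]

lemma pvT_append (xs : List Bool) (b : Bool) :
    pvT (xs ++ [b]) = pvT xs +
      (if pvPP (xs ++ [b]) (xs.length + 1) = 0 then pvE xs else pvO xs) := by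
  unfold pvT
  rw [show (xs ++ [b]).length + 1 = (xs.length + 1) + 1 by simp, Finset.sum_range_succ]
  congr 1
  · exact Finset.sum_congr rfl fun j hj => Finset.sum_congr rfl fun i hi => by
      unfold pvF
      have hj' : j ≤ xs.length := Nat.lt_succ_iff.mp (Finset.mem_range.mp hj)
      have hi' : i ≤ xs.length := le_trans (Nat.le_of_lt (Finset.mem_range.mp hi)) hj'
      rw [pvPP_append xs b i hi', pvPP_append xs b j hj']
  · by_cases hp : pvPP (xs ++ [b]) (xs.length + 1) = 0
    · rw [if_pos hp]
      unfold pvE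
      exact Finset.sum_congr rfl fun i hi => by
        unfold pvF
        rw [pvPP_append xs b i (Nat.lt_succ_iff.mp (Finset.mem_range.mp hi)), hp]
    · rw [if_neg hp]
      unfold pvO
      refine Finset.sum_congr rfl fun i hi => ?_
      unfold pvF
      rw [pvPP_append xs b i (Nat.lt_succ_iff.mp (Finset.mem_range.mp hi))]
      have h1 := pvPP_lt_two (xs ++ [b]) (xs.length + 1)
      have h2 := pvPP_lt_two xs i
      by_cases h : pvPP xs i = 0
      · rw [if_neg (by omega), if_pos h]
      · rw [if_pos (by omega), if_neg h]

-- invariant of B's single pass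
lemma alt_inv (xs : List Bool) :
    xs.foldl
      (fun (st : Int × Int × Int × Int) x =>
        let parity := if x then 1 - st.2.2.1 else st.2.2.1
        if parity = 0 then (st.1 + 1, st.2.1, parity, st.2.2.2 + st.1)
        else (st.1, st.2.1 + 1, parity, st.2.2.2 + st.2.1))
      (1, 0, 0, 0)
    = (pvE xs, pvO xs, ((xs.count true % 2 : Nat) : Int), pvT xs) := by
  induction xs using List.reverseRecOn with
  | nil => simp [pvE, pvO, pvT, pvPP]
  | append_singleton xs b ih =>
      rw [List.foldl_append, ih]
      have hplast : pvPP (xs ++ [b]) (xs.length + 1) = (xs.count true + (if b then 1 else 0)) % 2 :=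
        pvPP_append_last xs b
      have hc : (xs ++ [b]).count true = xs.count true + (if b then 1 else 0) := by
        rw [List.count_append]; cases b <;> simp
      have hpar : (if b then 1 - ((xs.count true % 2 : Nat) : Int) else ((xs.count true % 2 : Nat) : Int))
          = (((xs ++ [b]).count true % 2 : Nat) : Int) := by
        rw [hc]; cases b <;> simp <;> omega
      have hzero : ((((xs ++ [b]).count true % 2 : Nat) : Int) = 0)
          ↔ pvPP (xs ++ [b]) (xs.length + 1) = 0 := by
        rw [hplast, hc]; omega
      simp only [List.foldl_cons, List.foldl_nil, hpar]
      by_cases h0 : (((xs ++ [b]).count true % 2 : Nat) : Int) = 0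
      · rw [if_pos h0, pvE_append, pvO_append, pvT_append,
          if_pos (hzero.mp h0), if_pos (hzero.mp h0), if_pos (hzero.mp h0)]
        simp [add_comm]
      · rw [if_neg h0, pvE_append, pvO_append, pvT_append,
          if_neg (fun h => h0 (hzero.mpr h)), if_neg (fun h => h0 (hzero.mpr h)),
          if_neg (fun h => h0 (hzero.mpr h))]
        simp [add_comm]

lemma alt_eq_pvT (xs : List Bool) : count_palindromic_ranges_alt xs = pvT xs := by
  unfold count_palindromic_ranges_alt
  rw [alt_inv]

-- ===== A-side =====

-- unrolling the inner loop with its break over an ascending list of starts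
lemma innerA_eq (xs : List Bool) (n w : Int) :
    ∀ (l : List Int), l.Pairwise (· ≤ ·) → ∀ r,
      pvInnerA xs n w l r
        = r + ((l.filter (fun s => decide (s + w ≤ n))).map (pvInd xs w)).sum := by
  intro l
  induction l with
  | nil => intro _ r; simp [pvInnerA]
  | cons s rest ih =>
      intro hp r
      rw [List.pairwise_cons] at hp
      by_cases hb : s + w > n
      · have hfil : (s :: rest).filter (fun s => decide (s + w ≤ n)) = [] := by
          rw [List.filter_eq_nil_iff]
          intro t ht
          rcases List.mem_cons.mp ht with h | h
          · subst h; simpa using (by omega : ¬ (t + w ≤ n))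
          · have := hp.1 t h; simpa using (by omega : ¬ (t + w ≤ n))
        rw [hfil]
        simp [pvInnerA, hb]
      · have hle : s + w ≤ n := by omega
        rw [show (s :: rest).filter (fun s => decide (s + w ≤ n))
            = s :: rest.filter (fun s => decide (s + w ≤ n)) by
          rw [List.filter_cons_of_pos (by simpa using hle)]]
        simp only [pvInnerA, if_neg (by omega : ¬ s + w > n)]
        rw [ih hp.2]
        unfold pvInd
        simp only [List.map_cons, List.sum_cons]
        by_cases hpc : PySem.Int.mod ((PySem.List.pyRange s (s + w) 1).foldl
            (fun c i => if PySem.List.pyGetD xs i false then c + 1 else c) 0) 2 = 0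
        · rw [if_pos hpc, if_pos hpc]; ring
        · rw [if_neg hpc, if_neg hpc]; ring

-- the break condition filters the start range down to an initial range
lemma filter_starts (n w : Int) (h1 : 1 ≤ w) (h2 : w ≤ n) :
    (PySem.List.pyRange 0 n 1).filter (fun s => decide (s + w ≤ n))
      = PySem.List.pyRange 0 (n - w + 1) 1 := by
  rw [PySem.List.pyRange_one_append 0 (n - w + 1) n (by omega) (by omega), List.filter_append]
  have hfst : (PySem.List.pyRange 0 (n - w + 1) 1).filter (fun s => decide (s + w ≤ n))
      = PySem.List.pyRange 0 (n - w + 1) 1 := by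
    rw [List.filter_eq_self]
    intro s hs
    have := (PySem.List.mem_pyRange_one).mp hs
    simpa using (by omega : s + w ≤ n)
  have hsnd : (PySem.List.pyRange (n - w + 1) n 1).filter (fun s => decide (s + w ≤ n)) = [] := by
    rw [List.filter_eq_nil_iff]
    intro s hs
    have := (PySem.List.mem_pyRange_one).mp hs
    simpa using (by omega : ¬ (s + w ≤ n))
  rw [hfst, hsnd, List.append_nil]

-- the inner counting loop computes the difference of two prefix counts
lemma pc_counts (xs : List Bool) (s w : Nat) (h : s + w ≤ xs.length) :
    (PySem.List.pyRange (s : Int) ((s : Int) + (w : Int)) 1).foldl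
        (fun c i => if PySem.List.pyGetD xs i false then c + 1 else c) 0
      = ((xs.take (s + w)).count true : Int) - ((xs.take s).count true : Int) := by
  induction w with
  | zero =>
      rw [show ((s : Int) + ((0 : Nat) : Int)) = (s : Int) by simp,
        PySem.List.pyRange_one_eq_nil (le_refl _)]
      simp
  | succ w ihw =>
      have hsw : s + w < xs.length := by omega
      have hstep : (s : Int) + ((w + 1 : Nat) : Int) = ((s : Int) + (w : Int)) + 1 := by push_cast; ring
      rw [hstep, PySem.List.pyRange_one_succ_right (by omega), List.foldl_append,
        ihw (by omega)]
      have hcast : (s : Int) + (w : Int) = ((s + w : Nat) : Int) := by push_cast; ring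
      have hget : PySem.List.pyGetD xs ((s : Int) + (w : Int)) false = xs[s + w] := by
        rw [hcast, PySem.List.pyGetD_natCast]
        exact List.getD_eq_getElem xs false hsw
      have hcnt : (xs.take (s + w + 1)).count true
          = (xs.take (s + w)).count true + (if xs[s + w] then 1 else 0) := by
        rw [List.take_add_one, List.count_append, List.getElem?_eq_getElem hsw]
        cases hx : xs[s + w] <;> simp
      simp only [List.foldl_cons, List.foldl_nil, hget]
      rw [show s + (w + 1) = s + w + 1 by omega, hcnt]
      cases hx : xs[s + w] <;> simp [hx] <;> push_cast <;> ring

-- A's even-count test is prefix-parity agreement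
lemma ind_eq_F (xs : List Bool) (s w : Nat) (hw : 1 ≤ w) (h : s + w ≤ xs.length) :
    pvInd xs (w : Int) (s : Int) = pvF xs s (s + w) := by
  unfold pvInd pvF pvPP
  rw [pc_counts xs s w h, PySem.Int.mod_eq_emod_of_pos (by omega)]
  by_cases hp : ((xs.take s).count true) % 2 = ((xs.take (s + w)).count true) % 2
  · rw [if_pos (by omega), if_pos hp]
  · rw [if_neg (by omega), if_neg hp]

lemma sum_map_range_int (f : Nat → Int) (n : Nat) :
    ((List.range n).map f).sum = ∑ k ∈ Finset.range n, f k := by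
  induction n with
  | zero => simp
  | succ n ih => rw [List.range_succ, Finset.sum_range_succ, List.map_append, List.sum_append, ih]; simp

-- A equals the (k = width-1, s = start) double sum of parity agreements
lemma A_eq_double_sum (xs : List Bool) :
    count_palindromic_ranges xs
      = ∑ k ∈ Finset.range xs.length, ∑ s ∈ Finset.range (xs.length - k), pvF xs s (s + k + 1) := by
  unfold count_palindromic_ranges
  set N := xs.length with hN
  have hpair : (PySem.List.pyRange 0 (N : Int) 1).Pairwise (· ≤ ·) :=
    (PySem.List.pairwise_lt_pyRange_one 0 (N : Int)).imp (fun h => le_of_lt h)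
  have hcong : (PySem.List.pyRange 1 ((N : Int) + 1) 1).foldl
      (fun result width =>
        pvInnerA xs (N : Int) width (PySem.List.pyRange 0 (N : Int) 1) result) 0
    = (PySem.List.pyRange 1 ((N : Int) + 1) 1).foldl
      (fun result width =>
        result + (((PySem.List.pyRange 0 (N : Int) 1).filter
          (fun s => decide (s + width ≤ (N : Int)))).map (pvInd xs width)).sum) 0 :=
    PySem.List.foldl_congr_mem _ _ _ _
      (fun acc x _ => innerA_eq xs (N : Int) x (PySem.List.pyRange 0 (N : Int) 1) hpair acc)
  rw [hcong, PySem.List.foldl_add]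
  rw [zero_add, PySem.List.pyRange_one (a := 1) (b := (N : Int) + 1)]
  rw [show ((N : Int) + 1 - 1).toNat = N by omega, List.map_map, sum_map_range_int]
  refine Finset.sum_congr rfl fun k hk => ?_
  have hkN : k < N := Finset.mem_range.mp hk
  have hw1 : (1 : Int) ≤ 1 + (k : Int) := by omega
  have hw2 : 1 + (k : Int) ≤ (N : Int) := by omega
  rw [Function.comp_apply, filter_starts (N : Int) (1 + (k : Int)) hw1 hw2]
  rw [show (N : Int) - (1 + (k : Int)) + 1 = ((N - k : Nat) : Int) by
    push_cast [Nat.cast_sub (le_of_lt hkN)]; ring]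
  rw [PySem.List.pyRange_zero_nat, List.map_map, sum_map_range_int]
  refine Finset.sum_congr rfl fun s hs => ?_
  have hsNk : s < N - k := Finset.mem_range.mp hs
  have := ind_eq_F xs s (k + 1) (by omega) (by omega)
  rw [Function.comp_apply]
  calc pvInd xs (1 + (k : Int)) ((s : Nat) : Int)
      = pvInd xs ((k + 1 : Nat) : Int) ((s : Nat) : Int) := by push_cast; ring_nf
    _ = pvF xs s (s + (k + 1)) := this
    _ = pvF xs s (s + k + 1) := by rw [Nat.add_assoc]

-- triangle reindexing: (width-1, start) ↦ (end, start)
lemma triangle_reindex (f : Nat → Nat → Int) (N : Nat) :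
    ∑ k ∈ Finset.range N, ∑ s ∈ Finset.range (N - k), f s (s + k + 1)
      = ∑ j ∈ Finset.range (N + 1), ∑ i ∈ Finset.range j, f i j := by
  induction N with
  | zero => simp
  | succ N ih =>
      rw [Finset.sum_range_succ (n := N + 1)]
      rw [← ih]
      rw [Finset.sum_range_succ (n := N)]
      have hsplit : ∀ k ∈ Finset.range N,
          ∑ s ∈ Finset.range (N + 1 - k), f s (s + k + 1)
            = (∑ s ∈ Finset.range (N - k), f s (s + k + 1)) + f (N - k) (N + 1) := by
        intro k hk
        have hkN : k < N := Finset.mem_range.mp hk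
        rw [show N + 1 - k = (N - k) + 1 by omega, Finset.sum_range_succ,
          show N - k + k + 1 = N + 1 by omega]
      rw [Finset.sum_congr rfl hsplit, Finset.sum_add_distrib]
      have hrefl : (∑ k ∈ Finset.range N, f (N - k) (N + 1)) + f 0 (N + 1)
          = ∑ i ∈ Finset.range (N + 1), f i (N + 1) := by
        rw [show (∑ k ∈ Finset.range N, f (N - k) (N + 1)) + f 0 (N + 1)
            = ∑ k ∈ Finset.range (N + 1), f (N - k) (N + 1) by
          rw [Finset.sum_range_succ, Nat.sub_self]]
        rw [← Finset.sum_range_reflect]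
        refine Finset.sum_congr rfl fun i hi => ?_
        have hiN := Finset.mem_range.mp hi
        rw [show N - (N + 1 - 1 - i) = i by omega]
      rw [show ∑ s ∈ Finset.range (N + 1 - N), f s (s + N + 1) = f 0 (N + 1) by
        rw [show N + 1 - N = 1 by omega, Finset.sum_range_one]; norm_num]
      rw [← hrefl]
      ring

-- ===== VERDICT (by name: the statement is the Claim_ definition above) =====
theorem count_palindromic_ranges_spec : Claim_equal_count_palindromic_ranges := by
  intro xs _
  unfold Spec_count_palindromic_ranges
  rw [alt_eq_pvT, A_eq_double_sum, triangle_reindex, pvT]
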